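-- pv_equiv track=rewrite | github.com/plawanrath/Leetcode_Python | NumberOfMatchingSubstrings.py | numMatchingSubseq
-- ===== SOURCE A (Python) =====
-- from typing import List
--
-- def numMatchingSubseq(s: str, words: List[str]) -> int:
--     def is_sub(word):
--         index = -1
--         for ch in word:
--             index = s.find(ch, index + 1)
--             if index == -1:
--                 return False
--         return True
--
--     count = 0
--     for word in words:
--         if is_sub(word):
--             count += 1
--
--     return count
-- ===== SOURCE B (Python) =====
-- def numMatchingSubseq(s, words):
--     pos = {}
--     for i, ch in enumerate(s):
--         pos.setdefault(ch, []).append(i)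
--
--     def _bisect_left(a, x):
--         lo, hi = 0, len(a)
--         while lo < hi:
--             mid = (lo + hi) // 2
--             if a[mid] < x:
--                 lo = mid + 1
--             else:
--                 hi = mid
--         return lo
--
--     count = 0
--     for w in words:
--         i = 0
--         ok = True
--         for ch in w:
--             ps = pos.get(ch)
--             if ps is None:
--                 ok = False
--                 break
--             j = _bisect_left(ps, i)
--             if j == len(ps):
--                 ok = False
--                 break
--             i = ps[j] + 1
--         if ok:
--             count += 1
--     return count
-- ===== Notes on version B (the rewrite author's own statement) =====
-- stated objective: alternative
-- what changed: B builds a char -> sorted-positions index of s once and advances through each word by binary-searching the next occurrence, instead of A's repeated s.find(ch, index+1) scans.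
import Mathlib
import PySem

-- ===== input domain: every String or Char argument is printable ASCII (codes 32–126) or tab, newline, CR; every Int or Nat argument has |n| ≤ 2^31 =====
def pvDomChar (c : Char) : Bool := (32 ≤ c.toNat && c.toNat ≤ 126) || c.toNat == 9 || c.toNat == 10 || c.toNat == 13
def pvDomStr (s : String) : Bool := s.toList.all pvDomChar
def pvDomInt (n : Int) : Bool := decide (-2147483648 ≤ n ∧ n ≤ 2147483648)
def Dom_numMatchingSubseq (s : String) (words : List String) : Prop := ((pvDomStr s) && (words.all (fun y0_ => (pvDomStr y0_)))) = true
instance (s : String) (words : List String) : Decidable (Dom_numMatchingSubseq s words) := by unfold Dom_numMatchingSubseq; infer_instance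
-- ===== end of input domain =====

-- B re-implements A with a different algorithm: it indexes s once as char -> sorted positions
-- and binary-searches the next occurrence per word character, instead of repeated s.find scans.

-- ===== PORT A =====
-- A's inner helper is_sub: index = -1; for ch in word: index = s.find(ch, index+1); …
def pvIsSubA (sl : List Char) : List Char → Int → Bool
  | [], _ => true
  | ch :: rest, index =>
      let index' := PySem.Chars.findFrom sl [ch] (index + 1) none
      if index' == -1 then false else pvIsSubA sl rest index'

def numMatchingSubseq (s : String) (words : List String) : Int :=
  words.foldl (fun count word => if pvIsSubA s.toList word.toList (-1) then count + 1 else count) 0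

-- ===== PORT B =====
-- 'for i, ch in enumerate(s): pos.setdefault(ch, []).append(i)'
def pvBuildPos (sl : List Char) : PySem.Dict Char (List Int) :=
  (PySem.List.enumerate sl 0).foldl (fun d q => d.modify q.2 [] (· ++ [q.1])) PySem.Dict.empty

-- Source B's _bisect_left is bisect.bisect_left hand-written (A's module imports no stdlib to reuse);
-- it is ported as the prelude's primitive for it, PySem.List.bisectLeft.
-- 'ps[j]' is ported as List.getD, exact under the guard 'j != len(ps)'.
def pvIsSubB (pos : PySem.Dict Char (List Int)) : List Char → Int → Bool
  | [], _ => true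
  | ch :: rest, i =>
      match pos.get? ch with
      | none => false
      | some ps =>
          let j := PySem.List.bisectLeft ps i
          if j == ps.length then false
          else pvIsSubB pos rest (ps.getD j 0 + 1)

def numMatchingSubseq_alt (s : String) (words : List String) : Int :=
  let pos := pvBuildPos s.toList
  words.foldl (fun count word => if pvIsSubB pos word.toList 0 then count + 1 else count) 0

-- ===== PRECONDITION & SPEC =====
def Spec_numMatchingSubseq (s : String) (words : List String) (out : Int) : Prop := out = numMatchingSubseq_alt s words
instance (s : String) (words : List String) (out : Int) : Decidable (Spec_numMatchingSubseq s words out) := by unfold Spec_numMatchingSubseq; infer_instance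

-- ===== CLAIM (what is proved, stated in full; the proofs are below) =====
def Claim_equal_numMatchingSubseq : Prop := ∀ (s : String) (words : List String), Dom_numMatchingSubseq s words → Spec_numMatchingSubseq s words (numMatchingSubseq s words)

-- ===== LEMMAS AND PROOFS =====

-- a ≠ b: a sublist starting with a ignores a leading b
lemma cons_sublist_cons_of_ne {a b : Char} {l1 l2 : List Char} (h : a ≠ b) :
    List.Sublist (a :: l1) (b :: l2) ↔ List.Sublist (a :: l1) l2 := by
  constructor
  · intro hs
    rcases List.sublist_cons_iff.mp hs with h1 | ⟨r, hr, h2⟩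
    · exact h1
    · cases hr; exact absurd rfl h
  · intro hs; exact hs.cons b

-- greedy step: if the first occurrence of c in t is at r, matching c there loses nothing
lemma greedy_step (c : Char) (rest : List Char) :
    ∀ (r : Nat) (t : List Char) (hr : r < t.length), t[r] = c → (∀ i (hi : i < r), t[i]'(by omega) ≠ c) →
      (List.Sublist (c :: rest) t ↔ List.Sublist rest (t.drop (r + 1))) := by
  intro r
  induction r with
  | zero =>
    intro t hr hc _
    cases t with
    | nil => simp at hr
    | cons x t' =>
      simp only [List.getElem_cons_zero] at hc
      subst hc
      simp only [List.drop_succ_cons, List.drop_zero]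
      constructor
      · intro hs
        rcases List.sublist_cons_iff.mp hs with h1 | ⟨q, hq, h2⟩
        · exact (List.sublist_cons_self _ _).trans h1
        · cases hq; exact h2
      · intro hs; exact List.cons_sublist_cons.mpr hs
  | succ r ih =>
    intro t hr hc hmin
    cases t with
    | nil => simp at hr
    | cons x t' =>
      have hx : x ≠ c := by
        have := hmin 0 (by omega); simpa using this
      simp only [List.length_cons] at hr
      have hc' : t'[r] = c := by simpa using hc
      have hmin' : ∀ i (hi : i < r), t'[i]'(by omega) ≠ c := by
        intro i hi
        have := hmin (i+1) (by omega)
        simpa using this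
      rw [List.drop_succ_cons]
      rw [cons_sublist_cons_of_ne (fun he => hx he.symm)]
      exact ih t' (by omega) hc' hmin'

lemma prefix_singleton_drop (c : Char) (t : List Char) (i : Nat) (hi : i < t.length) :
    List.IsPrefix [c] (t.drop i) ↔ t[i] = c := by
  rw [List.drop_eq_getElem_cons hi]
  constructor
  · intro h; rcases h with ⟨u, hu⟩; injection hu with h1 _; exact h1.symm
  · intro h; exact ⟨t.drop (i+1), by rw [h]; rfl⟩

-- A's is_sub is the subsequence test (on the part of s after index i)
lemma isSubA_spec (sl : List Char) : ∀ (wl : List Char) (i : Int), -1 ≤ i → i + 1 ≤ (sl.length : Int) →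
      (pvIsSubA sl wl i = true ↔ List.Sublist wl (sl.drop (i + 1).toNat)) := by
  intro wl
  induction wl with
  | nil => intro i h1 h2; simp [pvIsSubA]
  | cons ch rest ih =>
    intro i h1 h2
    have hk : (i + 1).toNat ≤ sl.length := by omega
    set k := (i + 1).toNat with hkdef
    have hcast : i + 1 = (k : Int) := by omega
    rw [pvIsSubA, hcast]
    rw [PySem.Chars.findFrom_natCast sl [ch] k hk]
    set t := sl.drop k with htdef
    by_cases hf : PySem.Chars.find t [ch] = -1
    · rw [if_pos hf]
      simp only [beq_self_eq_true, if_true]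
      have hnin : ch ∉ t := by
        have := (PySem.Chars.find_eq_neg_one_iff t [ch]).mp hf
        intro hmem
        exact this ((List.singleton_infix_iff ch t).mpr hmem)
      simp only [Bool.false_eq_true, false_iff]
      intro hs
      exact hnin (hs.subset (by simp))
    · rw [if_neg hf]
      have hr0 : 0 ≤ PySem.Chars.find t [ch] := by
        have := PySem.Chars.neg_one_le_find t [ch]
        omega
      set r := PySem.Chars.find t [ch] with hrdef
      set rn := r.toNat with hrndef
      obtain ⟨hpre, hmin⟩ := PySem.Chars.find_spec (s := t) (sub := [ch]) hr0
      have hrn_lt : rn < t.length := by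
        rcases hpre with ⟨u, hu⟩
        have : (t.drop rn).length = 1 + u.length := by
          rw [hrndef, ← hu]; simp; omega
        have h2' := List.length_drop (l := t) (i := rn)
        omega
      have htr : t[rn] = ch := (prefix_singleton_drop ch t rn hrn_lt).mp hpre
      have htmin : ∀ i' (hi' : i' < rn), t[i']'(by omega) ≠ ch := by
        intro i' hi' he
        exact hmin i' hi' ((prefix_singleton_drop ch t i' (by omega)).mpr he)
      have hklen : k + rn < sl.length := by
        have : t.length = sl.length - k := by rw [htdef]; simp
        omega
      have hne : ((k : Int) + r == -1) = false := by
        simp only [beq_eq_false_iff_ne, ne_eq]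
        omega
      rw [hne, if_neg (by simp)]
      have harg1 : (-1 : Int) ≤ (k : Int) + r := by omega
      have harg2 : (k : Int) + r + 1 ≤ (sl.length : Int) := by omega
      rw [ih ((k : Int) + r) harg1 harg2]
      have htn : ((k : Int) + r + 1).toNat = k + (rn + 1) := by omega
      rw [htn]
      have hdd : sl.drop (k + (rn + 1)) = t.drop (rn + 1) := by
        rw [htdef, List.drop_drop]
      rw [hdd]
      exact (greedy_step ch rest rn t hrn_lt htr htmin).symm

-- the value B's index stores under ch: the positions of ch in s, in order
def posList (sl : List Char) (ch : Char) : List Int :=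
  ((PySem.List.enumerate sl 0).filter (fun q => q.2 == ch)).map (·.1)

lemma getD_buildPos (sl : List Char) (ch : Char) :
    (pvBuildPos sl).getD ch [] = posList sl ch := by
  unfold pvBuildPos posList
  have h : (PySem.List.enumerate sl 0).foldl (fun d q => d.modify q.2 [] (· ++ [q.1])) PySem.Dict.empty
      = ((PySem.List.enumerate sl 0).map (fun q => (q.2, q.1))).foldl
          (fun d p => d.modify p.1 [] (· ++ [p.2])) PySem.Dict.empty := by
    rw [List.foldl_map]
  rw [h, PySem.Dict.getD_foldl_modify_append]
  simp [List.filter_map, List.map_map, Function.comp_def]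

lemma get?_buildPos_none (sl : List Char) (ch : Char) :
    (pvBuildPos sl).get? ch = none ↔ ch ∉ sl := by
  rw [PySem.Dict.get?_eq_none_iff_not_mem_keys]
  unfold pvBuildPos
  rw [PySem.Dict.keys_foldl_modify_key]
  simp [pysem]

lemma posList_sorted (sl : List Char) (ch : Char) : (posList sl ch).Pairwise (· < ·) := by
  unfold posList
  apply List.Pairwise.map
  · intro a b hab; exact hab
  · exact (PySem.List.pairwise_lt_enumerate sl 0).filter _

lemma mem_posList (sl : List Char) (ch : Char) (x : Int) :
    x ∈ posList sl ch ↔ ∃ (k : Nat) (hk : k < sl.length), x = (k : Int) ∧ sl[k] = ch := by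
  unfold posList
  simp only [List.mem_map, List.mem_filter]
  constructor
  · rintro ⟨q, ⟨hq, hc⟩, hx⟩
    rcases (PySem.List.mem_enumerate_iff _ _ _).mp hq with ⟨k, hk, hqe⟩
    subst hqe
    refine ⟨k, hk, ?_, ?_⟩
    · simpa using hx.symm
    · simpa using (beq_iff_eq.mp hc)
  · rintro ⟨k, hk, rfl, hc⟩
    refine ⟨((k : Int), sl[k]), ⟨?_, by simpa using hc⟩, rfl⟩
    exact (PySem.List.mem_enumerate_iff _ _ _).mpr ⟨k, hk, by simp⟩

-- B's matcher is the same subsequence test (on the part of s from index i on)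
lemma isSubB_spec (sl : List Char) : ∀ (wl : List Char) (i : Int), 0 ≤ i → i ≤ (sl.length : Int) →
    (pvIsSubB (pvBuildPos sl) wl i = true ↔ List.Sublist wl (sl.drop i.toNat)) := by
  intro wl
  induction wl with
  | nil => intro i h0 hlen; simp [pvIsSubB]
  | cons ch rest ih =>
    intro i h0 hlen
    rw [pvIsSubB]
    cases hg : (pvBuildPos sl).get? ch with
    | none =>
      have hnin : ch ∉ sl := (get?_buildPos_none sl ch).mp hg
      simp only [Bool.false_eq_true, false_iff]
      intro hs
      exact hnin (List.drop_subset _ _ (hs.subset List.mem_cons_self))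
    | some ps =>
      dsimp only
      have hps : ps = posList sl ch := by
        have h' : (pvBuildPos sl).getD ch [] = ps := PySem.Dict.getD_of_get?_eq_some _ [] hg
        rw [← h', getD_buildPos]
      have hsorted : ps.Pairwise (· ≤ ·) := by
        rw [hps]; exact (posList_sorted sl ch).imp (fun h => le_of_lt h)
      obtain ⟨hj_le, hlt, hge⟩ := PySem.List.bisectLeft_spec ps i hsorted
      set j := PySem.List.bisectLeft ps i with hjdef
      by_cases hj : j = ps.length
      · rw [if_pos (by simpa using hj)]
        simp only [Bool.false_eq_true, false_iff]
        intro hs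
        have hmem : ch ∈ sl.drop i.toNat := hs.subset List.mem_cons_self
        rcases List.mem_iff_getElem.mp hmem with ⟨m, hm, hme⟩
        have hk : i.toNat + m < sl.length := by
          have := List.length_drop (l := sl) (i := i.toNat); omega
        have hch : sl[i.toNat + m] = ch := by
          rw [← List.getElem_drop]; exact hme
        have hmemps : ((i.toNat + m : Nat) : Int) ∈ ps := by
          rw [hps, mem_posList]; exact ⟨i.toNat + m, hk, rfl, hch⟩
        rcases List.mem_iff_getElem.mp hmemps with ⟨idx, hidx, hie⟩
        have := hlt idx hidx (by omega)
        omega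
      · have hjlt : j < ps.length := by omega
        rw [if_neg (by simpa using hj)]
        have hrd : ps.getD j 0 = ps[j] := List.getD_eq_getElem ps 0 hjlt
        set r := ps[j] with hrdef
        have hrmem : r ∈ ps := List.getElem_mem hjlt
        rcases (mem_posList sl ch r).mp (by rw [← hps]; exact hrmem) with ⟨k, hk, hkr, hkch⟩
        have hri : i ≤ r := hge j hjlt (le_refl j)
        have hik : i.toNat ≤ k := by omega
        set t := sl.drop i.toNat with htdef
        have htlen : t.length = sl.length - i.toNat := by rw [htdef]; simp
        set rn := k - i.toNat with hrndef
        have hrn_lt : rn < t.length := by omega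
        have htch : t[rn] = ch := by
          simp only [htdef, List.getElem_drop]
          simp only [show i.toNat + rn = k from by omega]
          exact hkch
        have hmin : ∀ m' (hm' : m' < rn), t[m']'(by omega) ≠ ch := by
          intro m' hm' he
          have hkm : i.toNat + m' < sl.length := by omega
          have hch' : sl[i.toNat + m']'(hkm) = ch := by
            simpa only [htdef, List.getElem_drop] using he
          have hmemps : ((i.toNat + m' : Nat) : Int) ∈ ps := by
            rw [hps, mem_posList]; exact ⟨i.toNat + m', hkm, rfl, hch'⟩
          rcases List.mem_iff_getElem.mp hmemps with ⟨idx, hidx, hie⟩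
          by_cases hij : idx < j
          · have := hlt idx hidx hij; omega
          · by_cases hej : idx = j
            · subst hej; rw [hie] at hrdef; omega
            · have hjlt' : j < idx := by omega
              have := List.pairwise_iff_getElem.mp (hps ▸ posList_sorted sl ch) j idx hjlt hidx hjlt'
              rw [hie] at this
              omega
        have harg0 : (0 : Int) ≤ r + 1 := by omega
        have harg1 : r + 1 ≤ (sl.length : Int) := by omega
        rw [hrd, ih (r + 1) harg0 harg1]
        have htn : (r + 1).toNat = k + 1 := by omega
        rw [htn]
        have hdd : sl.drop (k + 1) = t.drop (rn + 1) := by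
          rw [htdef, List.drop_drop]
          congr 1
          omega
        rw [hdd]
        exact (greedy_step ch rest rn t hrn_lt htch hmin).symm

lemma main_eq (s : String) (words : List String) :
    numMatchingSubseq s words = numMatchingSubseq_alt s words := by
  have hP : ∀ w : String, pvIsSubA s.toList w.toList (-1) = pvIsSubB (pvBuildPos s.toList) w.toList 0 := by
    intro w
    have hA' : pvIsSubA s.toList w.toList (-1) = true ↔ List.Sublist w.toList s.toList := by
      simpa using isSubA_spec s.toList w.toList (-1) (by omega) (by simp)
    have hB' : pvIsSubB (pvBuildPos s.toList) w.toList 0 = true ↔ List.Sublist w.toList s.toList := by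
      simpa using isSubB_spec s.toList w.toList 0 (by omega) (by simp)
    exact Bool.eq_iff_iff.mpr (hA'.trans hB'.symm)
  unfold numMatchingSubseq numMatchingSubseq_alt
  simp only [hP]

-- ===== VERDICT (by name: the statement is the Claim_ definition above) =====
theorem numMatchingSubseq_spec : Claim_equal_numMatchingSubseq := by
  intro s words _
  unfold Spec_numMatchingSubseq
  exact main_eq s words
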